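-- pv_equiv track=rewrite | github.com/sjmlli/KPI-Review | employees/role_utils.py | _permission_matches
-- ===== SOURCE A (Python) =====
-- from typing import Dict, List
--
-- def _permission_matches(permissions: List[str], permission: str) -> bool:
--     if '*' in permissions:
--         return True
--     if permission in permissions:
--         return True
--     parts = permission.split('.')
--     for idx in range(len(parts), 0, -1):
--         wildcard = '.'.join(parts[:idx]) + '.*'
--         if wildcard in permissions:
--             return True
--     return False
-- ===== SOURCE B (Python) =====
-- def _permission_matches(permissions, permission):
--     for p in permissions:
--         if p == '*' or p == permission:
--             return True
--         if p.endswith('.*'):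
--             prefix = p[:-2]
--             if prefix == permission or permission.startswith(prefix + '.'):
--                 return True
--     return False
-- ===== Notes on version B (the rewrite author's own statement) =====
-- stated objective: alternative
-- what changed: B drives the loop over the stored permissions and tests each entry as a matcher (exact, '*', or '.*'-wildcard prefix test), instead of A's construction of every dot-boundary prefix wildcard of the query and membership lookup per candidate.
import Mathlib
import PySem

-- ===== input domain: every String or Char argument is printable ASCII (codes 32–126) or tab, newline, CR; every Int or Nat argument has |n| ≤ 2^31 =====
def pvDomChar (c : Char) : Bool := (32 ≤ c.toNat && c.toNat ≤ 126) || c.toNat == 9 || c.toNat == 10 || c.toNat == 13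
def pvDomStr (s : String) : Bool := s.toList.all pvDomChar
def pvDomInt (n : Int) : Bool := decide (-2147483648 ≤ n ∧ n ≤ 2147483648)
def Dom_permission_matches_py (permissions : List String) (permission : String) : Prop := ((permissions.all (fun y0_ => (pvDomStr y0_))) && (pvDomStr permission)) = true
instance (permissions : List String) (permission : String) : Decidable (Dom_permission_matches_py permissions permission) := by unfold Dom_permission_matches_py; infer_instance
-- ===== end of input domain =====

-- B loops over the stored permissions and tests each entry as a matcher, instead of
-- A's per-prefix wildcard construction with a membership lookup for each candidate.

-- ===== PORT A =====
-- literal transliteration of _permission_matches: early returns, split('.'),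
-- countdown loop building '.'.join(parts[:idx]) + '.*' and testing membership
def permission_matches_py (permissions : List String) (permission : String) : Bool :=
  if permissions.contains "*" then true
  else if permissions.contains permission then true
  else
    let parts := PySem.Chars.splitOn permission.toList ['.']
    (PySem.List.pyRange (parts.length : Int) 0 (-1)).foldl
      (fun acc idx =>
        acc ||
          permissions.contains
            (String.ofList (PySem.Chars.join ['.'] (PySem.List.slice parts none (some idx)) ++ ".*".toList)))
      false

-- ===== PORT B =====
-- B's per-entry matcher: p == '*', p == permission, or p = prefix ++ '.*' covering permission
def pvMatchOne (permission p : List Char) : Bool :=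
  p == ['*'] || p == permission ||
    (PySem.Chars.endswith p ['.', '*'] &&
      (PySem.List.slice p none (some (-2)) == permission ||
        PySem.Chars.startswith permission (PySem.List.slice p none (some (-2)) ++ ['.'])))

def permission_matches_py_alt (permissions : List String) (permission : String) : Bool :=
  permissions.any (fun p => pvMatchOne permission.toList p.toList)

-- ===== PRECONDITION & SPEC =====
def Spec_permission_matches_py (permissions : List String) (permission : String) (out : Bool) : Prop := out = permission_matches_py_alt permissions permission
instance (permissions : List String) (permission : String) (out : Bool) : Decidable (Spec_permission_matches_py permissions permission out) := by unfold Spec_permission_matches_py; infer_instance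

-- ===== CLAIM (what is proved, stated in full; the proofs are below) =====
def Claim_equal_permission_matches_py : Prop := ∀ (permissions : List String) (permission : String), Dom_permission_matches_py permissions permission → Spec_permission_matches_py permissions permission (permission_matches_py permissions permission)

-- ===== LEMMAS AND PROOFS =====

-- clean structural recursion equal to PySem.Chars.splitOn · ['.']
def pvSp : List Char → List (List Char)
  | [] => [[]]
  | c :: rest =>
    if c = '.' then [] :: pvSp rest
    else
      match pvSp rest with
      | [] => [[c]]
      | p :: ps => (c :: p) :: ps

lemma pvSp_ne_nil (cs : List Char) : pvSp cs ≠ [] := by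
  cases cs with
  | nil => simp [pvSp]
  | cons c rest =>
    simp only [pvSp]
    split
    · simp
    · cases h : pvSp rest <;> simp

-- head-patching helper describing splitOn.go's accumulator
def pvHC (pre : List Char) : List (List Char) → List (List Char)
  | [] => [pre]
  | p :: ps => (pre ++ p) :: ps

lemma pvGo_eq (cs : List Char) : ∀ (fuel : Nat) (cur : List Char) (acc : List (List Char)),
    cs.length < fuel →
    PySem.Chars.splitOn.go ['.'] fuel cs cur acc = acc.reverse ++ pvHC cur.reverse (pvSp cs) := by
  induction cs with
  | nil =>
    intro fuel cur acc h
    match fuel, h with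
    | fuel + 1, _ => simp [PySem.Chars.splitOn.go, pvSp, pvHC]
  | cons c rest ih =>
    intro fuel cur acc h
    match fuel, h with
    | fuel + 1, h =>
      rw [PySem.Chars.splitOn.go]
      by_cases hc : c = '.'
      · have hpre : List.isPrefixOf ['.'] (c :: rest) = true := by
          simp [List.isPrefixOf, hc]
        rw [if_pos hpre]
        have : List.drop (List.length ['.']) (c :: rest) = rest := by simp
        rw [this, ih fuel [] (cur.reverse :: acc) (by simpa using Nat.lt_of_succ_lt_succ h)]
        obtain ⟨p, ps, hps⟩ : ∃ p ps, pvSp rest = p :: ps := by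
          cases hsp : pvSp rest with
          | nil => exact absurd hsp (pvSp_ne_nil rest)
          | cons p ps => exact ⟨p, ps, rfl⟩
        simp [pvSp, hc, hps, pvHC]
      · have hpre : List.isPrefixOf ['.'] (c :: rest) = false := by
          simp [List.isPrefixOf]
          exact fun h' => (hc h'.symm).elim
        rw [if_neg (by simp [hpre])]
        rw [ih fuel (c :: cur) acc (by simpa using Nat.lt_of_succ_lt_succ h)]
        obtain ⟨p, ps, hps⟩ : ∃ p ps, pvSp rest = p :: ps := by
          cases hsp : pvSp rest with
          | nil => exact absurd hsp (pvSp_ne_nil rest)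
          | cons p ps => exact ⟨p, ps, rfl⟩
        simp [pvSp, hc, hps, pvHC]

lemma pvSplitOn_eq (cs : List Char) : PySem.Chars.splitOn cs ['.'] = pvSp cs := by
  rw [PySem.Chars.splitOn, pvGo_eq cs (cs.length + 1) [] [] (Nat.lt_succ_self _)]
  obtain ⟨p, ps, hps⟩ : ∃ p ps, pvSp cs = p :: ps := by
    cases hsp : pvSp cs with
    | nil => exact absurd hsp (pvSp_ne_nil cs)
    | cons p ps => exact ⟨p, ps, rfl⟩
  simp [hps, pvHC]

-- join is a left inverse of split
lemma pvJoin_pvSp (cs : List Char) : PySem.Chars.join ['.'] (pvSp cs) = cs := by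
  induction cs with
  | nil => simp [pvSp, PySem.Chars.join_singleton]
  | cons c rest ih =>
    simp only [pvSp]
    by_cases hc : c = '.'
    · rw [if_pos hc]
      obtain ⟨p, ps, hps⟩ : ∃ p ps, pvSp rest = p :: ps := by
        cases hsp : pvSp rest with
        | nil => exact absurd hsp (pvSp_ne_nil rest)
        | cons p ps => exact ⟨p, ps, rfl⟩
      rw [hps, PySem.Chars.join_cons_cons]
      rw [hps] at ih; rw [ih, hc]
      simp
    · rw [if_neg hc]
      obtain ⟨p, ps, hps⟩ : ∃ p ps, pvSp rest = p :: ps := by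
        cases hsp : pvSp rest with
        | nil => exact absurd hsp (pvSp_ne_nil rest)
        | cons p ps => exact ⟨p, ps, rfl⟩
      rw [hps] at ih ⊢
      cases ps with
      | nil => simp only [PySem.Chars.join_singleton] at ih ⊢; rw [ih]
      | cons q qs =>
        rw [PySem.Chars.join_cons_cons] at ih ⊢
        simp only [List.cons_append, List.append_assoc] at ih ⊢
        rw [ih]

-- split distributes over a separator occurrence
lemma pvSp_append (a b : List Char) : pvSp (a ++ '.' :: b) = pvSp a ++ pvSp b := by
  induction a with
  | nil => simp [pvSp]
  | cons c a' ih =>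
    by_cases hc : c = '.'
    · simp only [List.cons_append, pvSp, if_pos hc, ih]
    · simp only [List.cons_append, pvSp, if_neg hc, ih]
      obtain ⟨p, ps, hps⟩ : ∃ p ps, pvSp a' = p :: ps := by
        cases hsp : pvSp a' with
        | nil => exact absurd hsp (pvSp_ne_nil a')
        | cons p ps => exact ⟨p, ps, rfl⟩
      simp [hps]

-- join over an append of nonempty part lists
lemma pvJoin_append (l1 l2 : List (List Char)) (h1 : l1 ≠ []) (h2 : l2 ≠ []) :
    PySem.Chars.join ['.'] (l1 ++ l2)
      = PySem.Chars.join ['.'] l1 ++ '.' :: PySem.Chars.join ['.'] l2 := by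
  induction l1 with
  | nil => exact absurd rfl h1
  | cons p ps ih =>
    cases ps with
    | nil =>
      cases l2 with
      | nil => exact absurd rfl h2
      | cons q qs =>
        rw [List.singleton_append, PySem.Chars.join_cons_cons, PySem.Chars.join_singleton]
        simp
    | cons r rs =>
      have h' := ih (by simp)
      simp only [List.cons_append] at h' ⊢
      rw [PySem.Chars.join_cons_cons ['.'] p r (rs ++ l2), h',
        PySem.Chars.join_cons_cons ['.'] p r rs]
      simp

-- the core characterisation: B's wildcard clause holds of cs exactly when cs is one of
-- the candidate wildcards A's loop constructs from permission ps
lemma pvCore (ps cs : List Char) :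
    (PySem.Chars.endswith cs ['.', '*'] &&
      (PySem.List.slice cs none (some (-2)) == ps ||
        PySem.Chars.startswith ps (PySem.List.slice cs none (some (-2)) ++ ['.']))) = true
    ↔ ∃ k : Nat, 1 ≤ k ∧ k ≤ (pvSp ps).length ∧
        cs = PySem.Chars.join ['.'] ((pvSp ps).take k) ++ ['.', '*'] := by
  have hslice : PySem.List.slice cs none (some (-2)) = cs.take (cs.length - 2) := by
    have := PySem.List.slice_to_neg_ofNat cs 2 (by norm_num)
    simpa using this
  constructor
  · intro h
    simp only [Bool.and_eq_true, Bool.or_eq_true, beq_iff_eq] at h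
    obtain ⟨hend, hrest⟩ := h
    rw [PySem.Chars.endswith] at hend
    rw [List.isSuffixOf_iff_suffix] at hend
    obtain ⟨pre, hpre⟩ := hend
    have hlen : cs.length = pre.length + 2 := by rw [← hpre]; simp
    have htake : cs.take (cs.length - 2) = pre := by
      rw [← hpre]
      have h2 : (pre ++ ['.', '*']).length - 2 = pre.length := by simp
      rw [h2, List.take_left]
    rw [hslice, htake] at hrest
    rcases hrest with hEq | hSw
    · -- pre = ps: take everything, k = length
      refine ⟨(pvSp ps).length, ?_, le_refl _, ?_⟩
      · have := pvSp_ne_nil ps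
        cases h : pvSp ps with
        | nil => exact absurd h this
        | cons a l => simp
      · rw [List.take_length, pvJoin_pvSp, ← hEq, hpre]
    · -- ps starts with pre ++ '.'
      rw [PySem.Chars.startswith] at hSw
      rw [List.isPrefixOf_iff_prefix] at hSw
      obtain ⟨rest, hrest⟩ := hSw
      refine ⟨(pvSp pre).length, ?_, ?_, ?_⟩
      · have := pvSp_ne_nil pre
        cases h : pvSp pre with
        | nil => exact absurd h this
        | cons a l => simp
      · rw [← hrest]
        have : pre ++ ['.'] ++ rest = pre ++ '.' :: rest := by simp
        rw [this, pvSp_append]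
        have := pvSp_ne_nil rest
        cases h : pvSp rest with
        | nil => exact absurd h this
        | cons a l => simp
      · rw [← hrest]
        have : pre ++ ['.'] ++ rest = pre ++ '.' :: rest := by simp
        rw [this, pvSp_append, List.take_left, pvJoin_pvSp, hpre]
  · rintro ⟨k, hk1, hk2, hcs⟩
    have hendsw : PySem.Chars.endswith cs ['.', '*'] = true := by
      rw [PySem.Chars.endswith, List.isSuffixOf_iff_suffix, hcs]
      exact List.suffix_append _ _
    have hpre' : cs.take (cs.length - 2) = PySem.Chars.join ['.'] ((pvSp ps).take k) := by
      rw [hcs]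
      have h2 : (PySem.Chars.join ['.'] ((pvSp ps).take k) ++ ['.', '*']).length - 2
          = (PySem.Chars.join ['.'] ((pvSp ps).take k)).length := by simp
      rw [h2, List.take_left]
    simp only [Bool.and_eq_true, Bool.or_eq_true, beq_iff_eq, hendsw, true_and, hslice, hpre']
    by_cases hkfull : k = (pvSp ps).length
    · left
      rw [hkfull, List.take_length, pvJoin_pvSp]
    · right
      have hklt : k < (pvSp ps).length := lt_of_le_of_ne hk2 hkfull
      rw [PySem.Chars.startswith, List.isPrefixOf_iff_prefix]
      have hsplit : pvSp ps = (pvSp ps).take k ++ (pvSp ps).drop k := (List.take_append_drop _ _).symm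
      have hdrop_ne : (pvSp ps).drop k ≠ [] := by
        intro h
        have := List.drop_eq_nil_iff.mp h
        omega
      have htake_ne : (pvSp ps).take k ≠ [] := by
        intro h
        rcases List.take_eq_nil_iff.mp h with h' | h'
        · omega
        · exact pvSp_ne_nil ps h'
      have : ps = PySem.Chars.join ['.'] ((pvSp ps).take k) ++ '.' ::
          PySem.Chars.join ['.'] ((pvSp ps).drop k) := by
        conv_lhs => rw [← pvJoin_pvSp ps, hsplit]
        exact pvJoin_append _ _ htake_ne hdrop_ne
      refine ⟨PySem.Chars.join ['.'] ((pvSp ps).drop k), ?_⟩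
      rw [List.append_assoc]
      simpa using this.symm

-- the early-return countdown loop is an ∃ over the range
lemma pvFoldl_or (l : List Int) (f : Int → Bool) (b : Bool) :
    l.foldl (fun acc i => acc || f i) b = (b || l.any f) := by
  induction l generalizing b with
  | nil => simp
  | cons x xs ih => simp [List.foldl_cons, ih, Bool.or_assoc]

-- ===== VERDICT (by name: the statement is the Claim_ definition above) =====
theorem permission_matches_py_spec : Claim_equal_permission_matches_py := by
  intro permissions permission _
  unfold Spec_permission_matches_py permission_matches_py permission_matches_py_alt
  by_cases h1 : permissions.contains "*" = true
  · rw [if_pos h1]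
    symm
    rw [List.any_eq_true]
    exact ⟨"*", List.contains_iff_mem.mp h1, by simp [pvMatchOne]⟩
  · rw [if_neg h1]
    by_cases h2 : permissions.contains permission = true
    · rw [if_pos h2]
      symm
      rw [List.any_eq_true]
      exact ⟨permission, List.contains_iff_mem.mp h2, by simp [pvMatchOne]⟩
    · rw [if_neg h2]
      rw [pvSplitOn_eq, pvFoldl_or, Bool.false_or]
      rw [Bool.eq_iff_iff, List.any_eq_true, List.any_eq_true]
      constructor
      · rintro ⟨idx, hmem, hcont⟩
        rw [PySem.List.mem_pyRange_neg_one] at hmem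
        obtain ⟨hpos, hle⟩ := hmem
        rw [List.contains_iff_mem] at hcont
        refine ⟨_, hcont, ?_⟩
        unfold pvMatchOne
        rw [Bool.or_eq_true]
        right
        rw [String.toList_ofList]
        rw [pvCore]
        refine ⟨idx.toNat, by omega, by omega, ?_⟩
        rw [PySem.List.slice_to _ (le_of_lt hpos)]
        simp
      · rintro ⟨p, hp, hmatch⟩
        unfold pvMatchOne at hmatch
        rw [Bool.or_eq_true] at hmatch
        rcases hmatch with h12 | h
        · rw [Bool.or_eq_true] at h12
          rcases h12 with h | h
          · exact absurd (List.contains_iff_mem.mpr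
              ((String.toList_inj.mp (by rw [beq_iff_eq] at h; rw [h]; decide) : p = "*") ▸ hp)) h1
          · exact absurd (List.contains_iff_mem.mpr
              ((String.toList_inj.mp (beq_iff_eq.mp h) : p = permission) ▸ hp)) h2
        · rw [pvCore] at h
          obtain ⟨k, hk1, hk2, hcs⟩ := h
          refine ⟨(k : Int), ?_, ?_⟩
          · rw [PySem.List.mem_pyRange_neg_one]
            constructor <;> [exact_mod_cast hk1; exact_mod_cast hk2]
          · rw [List.contains_iff_mem]
            have hw : String.ofList (PySem.Chars.join ['.']
                  (PySem.List.slice (pvSp permission.toList) none (some (k : Int))) ++ ".*".toList)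
                = p := by
              apply String.toList_inj.mp
              rw [String.toList_ofList, PySem.List.slice_to _ (by positivity), Int.toNat_natCast, hcs]
              simp
            rwa [hw]
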